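-- pv_equiv track=rewrite | github.com/GeorgeSittas/Advent-of-Code-2020 | day_10/solution_pt1.py | plug_adapters
-- ===== SOURCE A (Python) =====
-- def plug_adapters(n_adapters, curr, adapters, diff_1, diff_3):
-- 	if n_adapters == 0:
-- 		return diff_1, diff_3
--
-- 	possible = [x for x in adapters if x - curr <= 3]
--
-- 	if possible == []:
-- 		return None
--
-- 	for adapter in possible:
-- 		rest_adapters = [x for x in adapters if x != adapter]
-- 		upd_diff_1 = diff_1 + (adapter - curr == 1)
-- 		upd_diff_3 = diff_3 + (adapter - curr == 3)
--
-- 		res = plug_adapters(n_adapters-1, adapter, rest_adapters, \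
-- 			                                upd_diff_1, upd_diff_3)
-- 		if res is not None:
-- 			return res
-- ===== SOURCE B (Python) =====
-- def plug_adapters(n_adapters, curr, adapters, diff_1, diff_3):
--     # Iterative DFS with an explicit stack (top = end of list).
--     stack = [(n_adapters, curr, adapters, diff_1, diff_3)]
--     while stack:
--         n, c, ads, d1, d3 = stack.pop()
--         if n == 0:
--             return d1, d3
--         possible = [x for x in ads if x - c <= 3]
--         # push children in reversed order so they are popped left-to-right,
--         # matching the recursive first-found order
--         for a in reversed(possible):
--             stack.append((n - 1, a, [x for x in ads if x != a],
--                           d1 + (a - c == 1), d3 + (a - c == 3)))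
--     return None
-- ===== Notes on version B (the rewrite author's own statement) =====
-- stated objective: alternative
-- what changed: The recursive backtracking with an inner first-success loop is replaced by an iterative depth-first search over an explicit stack of frames, pushing children in reversed order so the pop order reproduces the recursion's left-to-right search.
import Mathlib
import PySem

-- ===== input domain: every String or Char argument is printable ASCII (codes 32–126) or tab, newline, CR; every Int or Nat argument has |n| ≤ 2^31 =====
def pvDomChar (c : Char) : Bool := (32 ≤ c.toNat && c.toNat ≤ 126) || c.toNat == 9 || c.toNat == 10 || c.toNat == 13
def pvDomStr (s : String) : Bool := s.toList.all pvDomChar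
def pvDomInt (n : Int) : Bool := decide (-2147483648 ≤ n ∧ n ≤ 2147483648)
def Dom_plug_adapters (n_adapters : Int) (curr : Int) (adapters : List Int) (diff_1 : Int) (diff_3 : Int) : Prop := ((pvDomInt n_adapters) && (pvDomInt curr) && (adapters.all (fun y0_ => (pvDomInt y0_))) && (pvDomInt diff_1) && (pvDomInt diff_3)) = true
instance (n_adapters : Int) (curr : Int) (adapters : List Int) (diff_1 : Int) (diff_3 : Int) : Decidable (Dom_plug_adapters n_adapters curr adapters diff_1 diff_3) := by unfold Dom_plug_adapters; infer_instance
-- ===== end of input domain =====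

-- B replaces A's recursive backtracking by an iterative DFS over an explicit stack (same search order, same cost).

-- termination helpers for the two ports (cited by name in their decreasing_by)
theorem pv_countP_ne_lt (a : Int) (l : List Int) (h : a ∈ l) :
    l.countP (fun x => !decide (x = a)) < l.length := by
  induction l with
  | nil => cases h
  | cons b t ih =>
    simp only [List.countP_cons, List.length_cons]
    by_cases hb : b = a
    · have hf : (!decide (b = a)) = false := by simp [hb]
      simp only [hf, if_neg Bool.false_ne_true]
      have := List.countP_le_length (l := t) (p := fun x => !decide (x = a))
      omega
    · rcases List.mem_cons.mp h with h1 | h2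
      · exact absurd h1.symm hb
      · have ht : (!decide (b = a)) = true := by simp [hb]
        simp only [ht, if_true]
        have := ih h2
        omega

theorem pv_filter_ne_lt (a : Int) (l : List Int) (h : a ∈ l) :
    (l.filter (fun x => x ≠ a)).length < l.length := by
  have h1 := pv_countP_ne_lt a l h
  rw [List.countP_eq_length_filter] at h1
  simpa using h1

-- ===== PORT A =====
-- literal port of the recursive backtracking: the Python names the filtered list
-- `possible`; it is written out here (twice) so the termination argument can see it,
-- and the for-loop with early return is the short-circuiting foldl over `possible`
-- (attach only carries the membership proof used for termination)
def plug_adapters (n_adapters : Int) (curr : Int) (adapters : List Int) (diff_1 : Int) (diff_3 : Int) : Option (Int × Int) :=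
  if n_adapters = 0 then some (diff_1, diff_3)
  else
    if (adapters.filter (fun x => x - curr ≤ 3)) = [] then none
    else
      (adapters.filter (fun x => x - curr ≤ 3)).attach.foldl
        (fun acc a =>
          match acc with
          | some r => some r
          | none =>
              plug_adapters (n_adapters - 1) a.val
                (adapters.filter (fun x => x ≠ a.val))
                (diff_1 + (if a.val - curr = 1 then 1 else 0))
                (diff_3 + (if a.val - curr = 3 then 1 else 0)))
        none
termination_by adapters.length
decreasing_by
  have h1 := pv_countP_ne_lt a.val adapters (List.mem_of_mem_filter a.property)
  have h2 : List.countP (fun (x : Subtype (Membership.mem adapters)) => !decide ((x : Int) = a.val))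
      adapters.attach < adapters.length :=
    (List.countP_attach (l := adapters) (p := fun x => !decide (x = a.val))).symm ▸ h1
  simp only [List.length_unattach]
  rw [← List.countP_eq_length_filter]
  simpa only [ne_eq, decide_not] using h2

-- ===== PORT B =====
-- the child frames pushed for one popped frame (Python pushes them in reversed
-- order onto a top-at-end stack; with the top of the stack at the head of the
-- list, that is prepending them in order)
def pvChildren (n : Int) (c : Int) (ads : List Int) (d1 : Int) (d3 : Int) :
    List (Int × Int × List Int × Int × Int) :=
  (ads.filter (fun x => x - c ≤ 3)).map
    (fun a => (n - 1, a, ads.filter (fun x => x ≠ a),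
      d1 + (if a - c = 1 then 1 else 0),
      d3 + (if a - c = 3 then 1 else 0)))

-- termination measure for the DFS loop: factorial weight of each frame's list
def pvStackW (st : List (Int × Int × List Int × Int × Int)) : Nat :=
  (st.map (fun f => (f.2.2.1.length + 1).factorial)).sum

theorem pv_sum_lt_factorial (L : List Nat) (n : Nat) (hlen : L.length ≤ n)
    (hb : ∀ w ∈ L, w ≤ n.factorial) : L.sum < (n + 1).factorial := by
  have h1 : L.sum ≤ L.length * n.factorial := by
    induction L with
    | nil => simp
    | cons w t ih =>
      have hw := hb w (List.mem_cons_self ..)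
      have ht := ih (Nat.le_of_succ_le hlen) (fun x hx => hb x (List.mem_cons_of_mem _ hx))
      simp only [List.sum_cons, List.length_cons, Nat.succ_mul]
      omega
  have h2 : L.length * n.factorial ≤ n * n.factorial := Nat.mul_le_mul_right _ hlen
  have h3 : n * n.factorial < (n + 1) * n.factorial :=
    (Nat.mul_lt_mul_right n.factorial_pos).mpr (Nat.lt_succ_self n)
  calc L.sum ≤ n * n.factorial := le_trans h1 h2
    _ < (n + 1) * n.factorial := h3
    _ = (n + 1).factorial := (Nat.factorial_succ n).symm

theorem pv_push_decreasing (n c : Int) (ads : List Int) (d1 d3 : Int)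
    (st : List (Int × Int × List Int × Int × Int)) :
    pvStackW (pvChildren n c ads d1 d3 ++ st) < pvStackW ((n, c, ads, d1, d3) :: st) := by
  simp only [pvChildren, pvStackW, List.map_append, List.sum_append, List.map_cons,
    List.sum_cons, List.map_map, Function.comp_def]
  have hkey :
      ((ads.filter (fun x => x - c ≤ 3)).map
        (fun a => ((ads.filter (fun x => x ≠ a)).length + 1).factorial)).sum
      < (ads.length + 1).factorial := by
    apply pv_sum_lt_factorial
    · simpa using List.length_filter_le _ _
    · intro w hw
      rcases List.mem_map.mp hw with ⟨a, ha, rfl⟩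
      have hlt : (ads.filter (fun x => x ≠ a)).length < ads.length :=
        pv_filter_ne_lt a ads (List.mem_of_mem_filter ha)
      exact Nat.factorial_le (by omega)
  omega

-- the iterative DFS loop: pop the top frame, return on n = 0, else push its children
def pvRunStack (st : List (Int × Int × List Int × Int × Int)) : Option (Int × Int) :=
  match st with
  | [] => none
  | (n, c, ads, d1, d3) :: rest =>
    if n = 0 then some (d1, d3)
    else pvRunStack (pvChildren n c ads d1 d3 ++ rest)
termination_by pvStackW st
decreasing_by
  exact pv_push_decreasing n c ads d1 d3 rest

def plug_adapters_alt (n_adapters : Int) (curr : Int) (adapters : List Int) (diff_1 : Int) (diff_3 : Int) : Option (Int × Int) :=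
  pvRunStack [(n_adapters, curr, adapters, diff_1, diff_3)]

-- ===== PRECONDITION & SPEC =====
def Spec_plug_adapters (n_adapters : Int) (curr : Int) (adapters : List Int) (diff_1 : Int) (diff_3 : Int) (out : Option (Int × Int)) : Prop := out = plug_adapters_alt n_adapters curr adapters diff_1 diff_3
instance (n_adapters : Int) (curr : Int) (adapters : List Int) (diff_1 : Int) (diff_3 : Int) (out : Option (Int × Int)) : Decidable (Spec_plug_adapters n_adapters curr adapters diff_1 diff_3 out) := by unfold Spec_plug_adapters; infer_instance

-- ===== CLAIM (what is proved, stated in full; the proofs are below) =====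
def Claim_equal_plug_adapters : Prop := ∀ (n_adapters : Int) (curr : Int) (adapters : List Int) (diff_1 : Int) (diff_3 : Int), Dom_plug_adapters n_adapters curr adapters diff_1 diff_3 → Spec_plug_adapters n_adapters curr adapters diff_1 diff_3 (plug_adapters n_adapters curr adapters diff_1 diff_3)

-- ===== LEMMAS AND PROOFS =====

-- a some accumulator is absorbing in A's foldl
theorem pv_foldl_some {α : Type} (g : α → Option (Int × Int)) (l : List α) (r : Int × Int) :
    l.foldl (fun acc a => match acc with | some r => some r | none => g a) (some r) = some r := by
  induction l with
  | nil => rfl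
  | cons a t ih => simpa using ih

-- the child frames are the attach-indexed map over `possible`
theorem pv_children_eq (n c : Int) (ads : List Int) (d1 d3 : Int) :
    pvChildren n c ads d1 d3
      = (ads.filter (fun x => x - c ≤ 3)).attach.map
          (fun a => (n - 1, a.val, ads.filter (fun x => x ≠ a.val),
            d1 + (if a.val - c = 1 then 1 else 0),
            d3 + (if a.val - c = 3 then 1 else 0))) := by
  unfold pvChildren
  exact List.attach_map_val.symm

-- weight bound for a partial list of child frames on top of the stack
theorem pv_stack_lt (n c : Int) (ads : List Int) (d1 d3 : Int)
    (st : List (Int × Int × List Int × Int × Int))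
    (l : List (Subtype (Membership.mem (ads.filter (fun x => x - c ≤ 3)))))
    (hlen : l.length ≤ ads.length) :
    pvStackW (l.map (fun a => (n - 1, a.val, ads.filter (fun x => x ≠ a.val),
        d1 + (if a.val - c = 1 then 1 else 0),
        d3 + (if a.val - c = 3 then 1 else 0))) ++ st)
      < pvStackW ((n, c, ads, d1, d3) :: st) := by
  simp only [pvStackW, List.map_append, List.sum_append, List.map_cons,
    List.sum_cons, List.map_map, Function.comp_def]
  have hkey : (l.map (fun a => ((ads.filter (fun x => x ≠ a.val)).length + 1).factorial)).sum
      < (ads.length + 1).factorial := by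
    apply pv_sum_lt_factorial
    · simpa using hlen
    · intro w hw
      rcases List.mem_map.mp hw with ⟨a, _, rfl⟩
      have hlt : (ads.filter (fun x => x ≠ a.val)).length < ads.length :=
        pv_filter_ne_lt a.val ads (List.mem_of_mem_filter a.property)
      exact Nat.factorial_le (by omega)
  omega

-- simulation: running the stack computes the top frame's backtracking result,
-- falling through to the rest of the stack on failure
theorem pv_sim (N : Nat) : ∀ (n c : Int) (ads : List Int) (d1 d3 : Int)
    (st : List (Int × Int × List Int × Int × Int)),
    pvStackW ((n, c, ads, d1, d3) :: st) ≤ N →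
    pvRunStack ((n, c, ads, d1, d3) :: st)
      = match plug_adapters n c ads d1 d3 with
        | some r => some r
        | none => pvRunStack st := by
  induction N with
  | zero =>
    intro n c ads d1 d3 st hw
    exfalso
    have h1 : 0 < pvStackW ((n, c, ads, d1, d3) :: st) := by
      simp only [pvStackW, List.map_cons, List.sum_cons]
      have := (ads.length + 1).factorial_pos
      omega
    omega
  | succ N ih =>
    intro n c ads d1 d3 st hw
    rw [pvRunStack, plug_adapters]
    by_cases hn : n = 0
    · simp [hn]
    · simp only [if_neg hn]
      by_cases hp : ads.filter (fun x => x - c ≤ 3) = []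
      · rw [if_pos hp]
        unfold pvChildren
        rw [hp]
        rfl
      · simp only [if_neg hp]
        rw [pv_children_eq]
        have hstart : ((ads.filter (fun x => x - c ≤ 3)).attach).length ≤ ads.length := by
          simpa using List.length_filter_le _ _
        -- inner induction over the remaining children
        suffices h : ∀ (l : List (Subtype (Membership.mem (ads.filter (fun x => x - c ≤ 3))))),
            l.length ≤ ads.length →
            pvRunStack (l.map (fun a => (n - 1, a.val, ads.filter (fun x => x ≠ a.val),
                d1 + (if a.val - c = 1 then 1 else 0),
                d3 + (if a.val - c = 3 then 1 else 0))) ++ st)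
            = match l.foldl (fun acc a =>
                match acc with
                | some r => some r
                | none =>
                    plug_adapters (n - 1) a.val
                      (ads.filter (fun x => x ≠ a.val))
                      (d1 + (if a.val - c = 1 then 1 else 0))
                      (d3 + (if a.val - c = 3 then 1 else 0))) none with
              | some r => some r
              | none => pvRunStack st from h _ hstart
        intro l
        induction l with
        | nil => intro _; simp
        | cons a t iht =>
          intro hlen
          simp only [List.map_cons, List.cons_append, List.foldl_cons]
          have hwchild : pvStackW ((n - 1, a.val, ads.filter (fun x => x ≠ a.val),
              d1 + (if a.val - c = 1 then 1 else 0),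
              d3 + (if a.val - c = 3 then 1 else 0)) ::
              (t.map (fun a => (n - 1, a.val, ads.filter (fun x => x ≠ a.val),
                d1 + (if a.val - c = 1 then 1 else 0),
                d3 + (if a.val - c = 3 then 1 else 0))) ++ st)) ≤ N := by
            have hfull := pv_stack_lt n c ads d1 d3 st (a :: t) hlen
            simp only [List.map_cons, List.cons_append] at hfull
            omega
          rw [ih _ _ _ _ _ _ hwchild]
          cases hres : plug_adapters (n - 1) a.val (ads.filter (fun x => x ≠ a.val))
              (d1 + (if a.val - c = 1 then 1 else 0))
              (d3 + (if a.val - c = 3 then 1 else 0)) with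
          | some r => simp [pv_foldl_some]
          | none => exact iht (Nat.le_of_succ_le hlen)

-- ===== VERDICT (by name: the statement is the Claim_ definition above) =====
theorem plug_adapters_spec : Claim_equal_plug_adapters := by
  intro n c ads d1 d3 _
  unfold Spec_plug_adapters plug_adapters_alt
  rw [pv_sim (pvStackW [(n, c, ads, d1, d3)]) n c ads d1 d3 [] le_rfl]
  cases plug_adapters n c ads d1 d3 with
  | some r => rfl
  | none => rw [pvRunStack]
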